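-- pv_equiv track=rewrite | github.com/lancelot291/algorithms-level-4 | 2025-01-24/67_pass-between-two.py | solution
-- ===== SOURCE A (Python) =====
-- def solution(s, skip, index):
--     s_new = []
--     skipset = set(skip)
--     for ch in s:
--         i = 0
--         while i < index:
--             ch = chr((ord(ch) + 1 - ord('a'))%26 + ord('a'))
--             if ch not in skipset:
--                 i += 1
--         s_new.append(ch)
--
--     return "".join(s_new)
-- ===== SOURCE B (Python) =====
-- def solution(s, skip, index):
--     # Cyclic list of allowed lowercase letters; each character jumps there by
--     # modular arithmetic in O(1) instead of stepping `index` times.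
--     skipset = set(skip)
--     allowed = [p for p in range(26) if chr(97 + p) not in skipset]
--     m = len(allowed)
--     out = []
--     for ch in s:
--         if index <= 0 or m == 0:
--             out.append(ch)
--         else:
--             p0 = (ord(ch) - 97) % 26
--             idx0 = sum(1 for p in allowed if p <= p0)
--             out.append(chr(97 + allowed[(idx0 + index - 1) % m]))
--     return "".join(out)
-- ===== Notes on version B (the rewrite author's own statement) =====
-- stated objective: faster
-- what changed: B precomputes the cyclic list of allowed letter positions once and maps each character to its target with one modular-arithmetic index computation, instead of A's per-character stepping loop that walks the alphabet index times (counting only non-skipped letters).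
import Mathlib
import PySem

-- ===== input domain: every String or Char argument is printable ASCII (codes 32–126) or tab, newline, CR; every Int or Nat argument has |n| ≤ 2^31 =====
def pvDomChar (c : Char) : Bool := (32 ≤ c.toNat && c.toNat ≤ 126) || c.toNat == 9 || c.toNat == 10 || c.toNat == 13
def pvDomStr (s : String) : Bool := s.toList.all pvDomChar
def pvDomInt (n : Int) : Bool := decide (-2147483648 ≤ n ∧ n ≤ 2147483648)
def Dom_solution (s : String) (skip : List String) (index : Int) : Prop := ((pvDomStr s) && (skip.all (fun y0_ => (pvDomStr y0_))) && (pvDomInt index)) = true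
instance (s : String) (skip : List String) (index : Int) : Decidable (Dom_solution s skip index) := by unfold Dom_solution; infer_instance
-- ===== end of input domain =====

-- B replaces A's per-character stepping loop (O(index) steps per character) by a
-- precomputed cyclic list of allowed letters indexed with modular arithmetic.

-- ===== PORT A =====
-- the while-loop of A; fuel 26*index is enough whenever the Python loop terminates
def solLoopA (skipset : List String) (index : Int) : Nat → Char → Int → Char
  | 0, ch, _ => ch
  | fuel+1, ch, i =>
    if i < index then
      let ch2 := Char.ofNat (PySem.Int.mod ((ch.toNat : Int) + 1 - 97) 26 + 97).toNat
      if String.ofList [ch2] ∈ skipset then solLoopA skipset index fuel ch2 i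
      else solLoopA skipset index fuel ch2 (i+1)
    else ch

def solution (s : String) (skip : List String) (index : Int) : String :=
  let skipset := PySem.Set.ofList skip
  let sNew := s.toList.foldl
    (fun acc ch => acc ++ [String.ofList [solLoopA skipset index (26 * index).toNat ch 0]]) []
  PySem.Str.join "" sNew

-- ===== PORT B =====
def solution_alt (s : String) (skip : List String) (index : Int) : String :=
  let skipset := PySem.Set.ofList skip
  let allowed := (PySem.List.pyRange 0 26 1).filter
    (fun p => !decide (String.ofList [Char.ofNat (97 + p).toNat] ∈ skipset))
  let m := allowed.length
  let out := s.toList.foldl (fun acc ch =>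
    if index ≤ 0 ∨ m = 0 then acc ++ [String.ofList [ch]]
    else
      let p0 := PySem.Int.mod ((ch.toNat : Int) - 97) 26
      let idx0 := ((allowed.filter (fun p => decide (p ≤ p0))).length : Int)
      acc ++ [String.ofList [Char.ofNat
        (97 + PySem.List.pyGetD allowed (PySem.Int.mod (idx0 + index - 1) (m : Int)) 0).toNat]]) []
  PySem.Str.join "" out

-- ===== PRECONDITION & SPEC =====
-- Pre_ excludes only the inputs where index ≥ 1 and all 26 lowercase letters are in
-- skip: there A's while-loop never terminates (the Python call diverges).
def Pre_solution (s : String) (skip : List String) (index : Int) : Prop :=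
  index ≤ 0 ∨ ∃ p ∈ List.range 26, String.ofList [Char.ofNat (97 + p)] ∉ skip
instance (s : String) (skip : List String) (index : Int) : Decidable (Pre_solution s skip index) := by
  unfold Pre_solution; infer_instance

def pvWitness_solution : String × List String × Int := ("hello world!", ["a", "b"], 3)

def Spec_solution (s : String) (skip : List String) (index : Int) (out : String) : Prop := out = solution_alt s skip index
instance (s : String) (skip : List String) (index : Int) (out : String) : Decidable (Spec_solution s skip index out) := by unfold Spec_solution; infer_instance

-- ===== CLAIM (what is proved, stated in full; the proofs are below) =====
def Claim_equal_solution : Prop := ∀ (s : String) (skip : List String) (index : Int), Dom_solution s skip index → Pre_solution s skip index → Spec_solution s skip index (solution s skip index)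

-- ===== LEMMAS AND PROOFS =====

-- whether the lowercase letter at position q (0..25) is in the skip set
def blk (ss : List String) (q : Nat) : Bool := decide (String.ofList [Char.ofNat (97 + q)] ∈ ss)

-- positions of the allowed letters, in increasing order
def alw (ss : List String) : List Nat := (List.range 26).filter (fun q => !blk ss q)

-- number of allowed positions ≤ p
def cnt (ss : List String) (p : Nat) : Nat := ((alw ss).filter (fun q => decide (q ≤ p))).length

-- positions p, p-1, p-2, … (cyclically), 26 of them
def backListFull (p : Nat) : List Nat := (List.range 26).map (fun t => (p + 26 - t) % 26)

-- length of the blocked run ending at p, walking backwards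
def back (ss : List String) (p : Nat) : Nat := ((backListFull p).takeWhile (blk ss)).length

-- A's while-loop on positions 0..25
def loopPos (ss : List String) (index : Int) : Nat → Nat → Int → Nat
  | 0, p, _ => p
  | fuel+1, p, i =>
    if i < index then
      if blk ss ((p+1) % 26) then loopPos ss index fuel ((p+1) % 26) i
      else loopPos ss index fuel ((p+1) % 26) (i+1)
    else p

theorem loopPos_stop (ss : List String) (index : Int) (fuel p : Nat) (i : Int)
    (h : ¬ i < index) : loopPos ss index fuel p i = p := by
  cases fuel <;> simp [loopPos, h]

theorem charStep (p : Nat) (hp : p < 26) : (Char.ofNat (97 + p)).toNat = 97 + p := by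
  interval_cases p <;> decide

theorem modStep (p : Nat) (hp : p < 26) :
    (PySem.Int.mod (((97 + p : Nat) : Int) + 1 - 97) 26 + 97).toNat = 97 + (p+1) % 26 := by
  interval_cases p <;> decide


theorem mem_backListFull (p q : Nat) (hp : p < 26) (hq : q < 26) : q ∈ backListFull p := by
  unfold backListFull
  rw [List.mem_map]
  by_cases h : q ≤ p
  · exact ⟨p - q, List.mem_range.mpr (by omega), by
      have e : p + 26 - (p - q) = 26 + q := by omega
      rw [e, Nat.add_mod_left, Nat.mod_eq_of_lt hq]⟩
  · exact ⟨p + 26 - q, List.mem_range.mpr (by omega), by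
      have e : p + 26 - (p + 26 - q) = q := by omega
      rw [e, Nat.mod_eq_of_lt hq]⟩

theorem backListFull_step (p : Nat) (hp : p < 26) :
    backListFull ((p+1) % 26) = ((p+1) % 26) :: (backListFull p).take 25 := by
  unfold backListFull
  rw [← List.map_take, List.take_range, show min 25 26 = 25 from rfl,
      show (26:Nat) = 25+1 from rfl, List.range_succ_eq_map, List.map_cons, List.map_map]
  congr 1
  · have h1 : (p+1) % 26 < 26 := Nat.mod_lt _ (by omega)
    show ((p+1) % 26 + 26 - 0) % 26 = (p+1) % 26
    simp [Nat.add_mod_right, Nat.mod_eq_of_lt h1]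
  · apply List.map_congr_left
    intro t ht
    have ht' := List.mem_range.mp ht
    show ((p+1) % 26 + 26 - Nat.succ t) % 26 = (p + 26 - t) % 26
    rcases Nat.lt_or_ge p 25 with h25 | h25
    · have he : (p+1) % 26 = p+1 := Nat.mod_eq_of_lt (by omega)
      rw [he]
      congr 1
      omega
    · have hp25 : p = 25 := by omega
      subst hp25
      norm_num
      have e1 : 26 - Nat.succ t = 25 - t := by omega
      have e2 : 51 - t = 26 + (25 - t) := by omega
      rw [e1, e2, Nat.add_mod_left]
      exact (Nat.mod_eq_of_lt (by omega)).symm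

theorem back_le (ss : List String) (p : Nat) (hm : alw ss ≠ []) (hp : p < 26) :
    back ss p ≤ 25 := by
  by_contra h
  rw [not_le] at h
  have hlen : (backListFull p).length = 26 := by simp [backListFull]
  have hpre := List.takeWhile_prefix (l := backListFull p) (p := blk ss)
  have heq : (backListFull p).takeWhile (blk ss) = backListFull p :=
    List.IsPrefix.eq_of_length_le hpre (by unfold back at h; omega)
  apply hm
  unfold alw
  rw [List.filter_eq_nil_iff]
  intro q hq
  have hq' := List.mem_range.mp hq
  have hmem : q ∈ backListFull p := mem_backListFull p q hp hq'
  have hblk : blk ss q = true := List.mem_takeWhile_imp (heq ▸ hmem)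
  simp [hblk]

theorem back_step_free (ss : List String) (p : Nat) (hp : p < 26)
    (hb : blk ss ((p+1) % 26) = false) : back ss ((p+1) % 26) = 0 := by
  unfold back
  rw [backListFull_step p hp, List.takeWhile_cons_of_neg (by simp [hb])]
  rfl

theorem back_step_blocked (ss : List String) (p : Nat) (hm : alw ss ≠ []) (hp : p < 26)
    (hb : blk ss ((p+1) % 26) = true) : back ss ((p+1) % 26) = back ss p + 1 := by
  have hp' : (p+1) % 26 < 26 := Nat.mod_lt _ (by omega)
  have hble := back_le ss p hm hp
  have hble' := back_le ss ((p+1) % 26) hm hp'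
  have he : back ss ((p+1) % 26) = 1 + min 25 (back ss p) := by
    unfold back
    rw [backListFull_step p hp, List.takeWhile_cons_of_pos (by simp [hb]),
        List.length_cons, ← List.take_takeWhile, List.length_take]
    omega
  omega

theorem countP_le_succ (l : List Nat) (p : Nat) :
    (l.filter (fun q => decide (q ≤ p+1))).length =
      (l.filter (fun q => decide (q ≤ p))).length + l.count (p+1) := by
  induction l with
  | nil => simp
  | cons a t ih =>
    simp only [List.filter_cons, List.count_cons]
    by_cases h1 : a ≤ p + 1 <;> by_cases h2 : a ≤ p <;> by_cases h3 : a = p+1 <;>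
      simp [h1, h2, h3, ih] <;> omega

theorem mem_alw_lt (ss : List String) (q : Nat) (hq : q ∈ alw ss) : q < 26 := by
  unfold alw at hq
  exact List.mem_range.mp (List.mem_filter.mp hq).1

theorem count_alw (ss : List String) (q : Nat) (hq : q < 26) :
    (alw ss).count q = if blk ss q then 0 else 1 := by
  by_cases hb : blk ss q
  · simp only [hb, if_true]
    rw [List.count_eq_zero]
    simp [alw, List.mem_filter, hb]
  · simp only [hb]
    unfold alw
    rw [List.count_filter (by simp [hb]), List.count_range]
    simp [hq]

theorem cnt_succ (ss : List String) (p : Nat) (hp : p < 25) :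
    cnt ss (p+1) = cnt ss p + (if blk ss (p+1) then 0 else 1) := by
  unfold cnt
  rw [countP_le_succ, count_alw ss (p+1) (by omega)]

theorem cnt_25 (ss : List String) : cnt ss 25 = (alw ss).length := by
  unfold cnt
  rw [List.filter_eq_self.mpr]
  intro q hq
  have := mem_alw_lt ss q hq
  simp
  omega

theorem cnt_zero (ss : List String) : cnt ss 0 = if blk ss 0 then 0 else 1 := by
  unfold cnt
  rw [List.filter_congr (q := fun q => q == 0) (by intro q _; cases q <;> simp)]
  rw [← List.countP_eq_length_filter]
  show (alw ss).count 0 = _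
  exact count_alw ss 0 (by omega)

theorem alw_split (ss : List String) (p : Nat) (hp : p < 25) (hb : blk ss (p+1) = false) :
    alw ss = (List.range (p+1)).filter (fun q => !blk ss q) ++
      (p+1) :: ((List.range (24-p)).map (fun k => (p+1) + Nat.succ k)).filter (fun q => !blk ss q) := by
  unfold alw
  have hsplit : List.range 26 = List.range (p+1) ++
      ((p+1) :: ((List.range (24-p)).map (fun k => (p+1) + Nat.succ k))) := by
    rw [show (26:Nat) = (p+1) + (25-p) by omega, List.range_add]
    congr 1
    rw [show (25-p : Nat) = (24-p)+1 by omega, List.range_succ_eq_map]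
    simp [List.map_map]
  rw [hsplit, List.filter_append, List.filter_cons]
  simp [hb]

theorem getD_cnt (ss : List String) (p : Nat) (hp : p < 25) (hb : blk ss (p+1) = false) :
    (alw ss).getD (cnt ss p) 0 = p + 1 ∧ cnt ss p < (alw ss).length := by
  have hsp := alw_split ss p hp hb
  set F1 := (List.range (p+1)).filter (fun q => !blk ss q) with hF1
  set F2 := ((List.range (24-p)).map (fun k => (p+1) + Nat.succ k)).filter (fun q => !blk ss q) with hF2
  have hcnt : cnt ss p = F1.length := by
    unfold cnt
    rw [hsp, List.filter_append, List.filter_cons]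
    have e1 : F1.filter (fun q => decide (q ≤ p)) = F1 := by
      apply List.filter_eq_self.mpr
      intro q hq
      have : q < p + 1 := List.mem_range.mp (List.mem_filter.mp hq).1
      simp
      omega
    have e2 : F2.filter (fun q => decide (q ≤ p)) = [] := by
      rw [List.filter_eq_nil_iff]
      intro q hq
      obtain ⟨k, _, hk⟩ := List.mem_map.mp (List.mem_filter.mp hq).1
      simp
      omega
    simp [e1, e2]
  constructor
  · rw [hcnt, hsp, List.getD_append_right F1 _ 0 _ (le_refl _), Nat.sub_self]
    rfl
  · rw [hcnt, hsp, List.length_append, List.length_cons]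
    omega

theorem head_alw (ss : List String) (hb : blk ss 0 = false) : (alw ss).getD 0 0 = 0 := by
  unfold alw
  rw [show (26:Nat) = 25+1 from rfl, List.range_succ_eq_map, List.filter_cons]
  simp [hb]

theorem core (ss : List String) (index : Int) (hm : alw ss ≠ []) :
    ∀ (fuel p : Nat) (i : Int), p < 26 → i < index →
    26 * (index - i) ≤ (fuel : Int) + (back ss p : Int) →
    loopPos ss index fuel p i =
      (alw ss).getD ((cnt ss p + (index - i).toNat - 1) % (alw ss).length) 0 := by
  intro fuel
  induction fuel with
  | zero =>
    intro p i hp hi hfuel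
    exfalso
    have hb := back_le ss p hm hp
    have h1 : (1:Int) ≤ index - i := by omega
    have : ((back ss p : Nat) : Int) ≤ 25 := by exact_mod_cast hb
    push_cast at hfuel
    omega
  | succ f ih =>
    intro p i hp hi hfuel
    have hp' : (p+1) % 26 < 26 := Nat.mod_lt _ (by omega)
    have hble := back_le ss p hm hp
    have hmlen : 0 < (alw ss).length := List.length_pos_iff.mpr hm
    simp only [loopPos, if_pos hi]
    by_cases hb : blk ss ((p+1) % 26)
    · rw [if_pos hb, ih ((p+1) % 26) i hp' hi (by
        have h1 := back_step_blocked ss p hm hp hb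
        rw [h1]
        push_cast at hfuel ⊢
        omega)]
      congr 1
      rcases Nat.lt_or_ge p 25 with h25 | h25
      · have he : (p+1) % 26 = p+1 := Nat.mod_eq_of_lt (by omega)
        rw [he] at hb ⊢
        rw [cnt_succ ss p h25]
        simp [hb]
      · have hp25 : p = 25 := by omega
        subst hp25
        rw [show (25+1) % 26 = 0 from rfl] at hb
        rw [show (25+1) % 26 = 0 from rfl, cnt_zero, cnt_25]
        simp only [hb, if_true]
        have e : (alw ss).length + (index - i).toNat - 1 =
            (alw ss).length + ((index - i).toNat - 1) := by omega
        rw [e, Nat.add_mod_left]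
        congr 1
        omega
    · have hbf : blk ss ((p+1) % 26) = false := by simpa using hb
      rw [if_neg hb]
      by_cases hlast : i + 1 < index
      · rw [ih ((p+1) % 26) (i+1) hp' hlast (by
          have h0 := back_step_free ss p hp hbf
          rw [h0]
          push_cast at hfuel ⊢
          omega)]
        congr 1
        have hr2 : 2 ≤ (index - i).toNat := by omega
        have hrr : (index - (i+1)).toNat = (index - i).toNat - 1 := by omega
        rw [hrr]
        rcases Nat.lt_or_ge p 25 with h25 | h25
        · have he : (p+1) % 26 = p+1 := Nat.mod_eq_of_lt (by omega)
          rw [he] at hb ⊢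
          rw [cnt_succ ss p h25]
          simp [hb]
          congr 1
          omega
        · have hp25 : p = 25 := by omega
          subst hp25
          rw [show (25+1) % 26 = 0 from rfl] at hbf
          rw [show (25+1) % 26 = 0 from rfl, cnt_zero, cnt_25]
          simp only [hbf, Bool.false_eq_true, if_false]
          have e : (alw ss).length + (index - i).toNat - 1 =
              (alw ss).length + ((index - i).toNat - 1) := by omega
          rw [e, Nat.add_mod_left]
          congr 1
          omega
      · rw [loopPos_stop ss index f _ _ hlast]
        have hieq : (index - i).toNat = 1 := by omega
        rw [hieq]
        rcases Nat.lt_or_ge p 25 with h25 | h25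
        · have he : (p+1) % 26 = p+1 := Nat.mod_eq_of_lt (by omega)
          rw [he] at hbf ⊢
          obtain ⟨hg, hlt⟩ := getD_cnt ss p h25 hbf
          rw [show cnt ss p + 1 - 1 = cnt ss p by omega, Nat.mod_eq_of_lt hlt]
          exact hg.symm
        · have hp25 : p = 25 := by omega
          subst hp25
          rw [show (25+1) % 26 = 0 from rfl] at hbf
          rw [show (25+1) % 26 = 0 from rfl, cnt_25,
              show (alw ss).length + 1 - 1 = (alw ss).length from rfl, Nat.mod_self]
          exact (head_alw ss hbf).symm

theorem bridge (ss : List String) (index : Int) :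
    ∀ (fuel p : Nat) (i : Int), p < 26 →
    solLoopA ss index fuel (Char.ofNat (97 + p)) i = Char.ofNat (97 + loopPos ss index fuel p i) := by
  intro fuel
  induction fuel with
  | zero => intro p i hp; simp [solLoopA, loopPos]
  | succ f ih =>
    intro p i hp
    have hp' : (p+1) % 26 < 26 := Nat.mod_lt _ (by omega)
    simp only [solLoopA, loopPos]
    by_cases hi : i < index
    · simp only [if_pos hi]
      have hch : Char.ofNat (PySem.Int.mod (((Char.ofNat (97 + p)).toNat : Int) + 1 - 97) 26 + 97).toNat
          = Char.ofNat (97 + (p+1) % 26) := by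
        rw [charStep p hp]
        exact congrArg Char.ofNat (modStep p hp)
      rw [hch]
      simp only [blk, decide_eq_true_eq]
      split_ifs with h
      · exact ih ((p+1) % 26) i hp'
      · exact ih ((p+1) % 26) (i+1) hp'
    · simp [if_neg hi]

theorem p0_lt (ch : Char) : (PySem.Int.mod ((ch.toNat : Int) - 97) 26).toNat < 26 := by
  have h1 := PySem.Int.mod_nonneg ((ch.toNat : Int) - 97) (show (0:Int) < 26 by omega)
  have h2 := PySem.Int.mod_lt ((ch.toNat : Int) - 97) (show (0:Int) < 26 by omega)
  omega

theorem swapStart (ss : List String) (index : Int) (ch : Char) (fuel : Nat)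
    (hi : 0 < index) (hf : 1 ≤ fuel) :
    solLoopA ss index fuel ch 0 =
      solLoopA ss index fuel (Char.ofNat (97 + (PySem.Int.mod ((ch.toNat : Int) - 97) 26).toNat)) 0 := by
  obtain ⟨f, rfl⟩ : ∃ f, fuel = f + 1 := ⟨fuel - 1, by omega⟩
  set p0 := (PySem.Int.mod ((ch.toNat : Int) - 97) 26).toNat with hp0
  have hlt : p0 < 26 := p0_lt ch
  have hcast : (p0 : Int) = PySem.Int.mod ((ch.toNat : Int) - 97) 26 :=
    Int.toNat_of_nonneg (PySem.Int.mod_nonneg _ (by omega))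
  have hch : Char.ofNat (PySem.Int.mod ((ch.toNat : Int) + 1 - 97) 26 + 97).toNat
      = Char.ofNat (PySem.Int.mod (((Char.ofNat (97 + p0)).toNat : Int) + 1 - 97) 26 + 97).toNat := by
    congr 2
    rw [charStep p0 hlt]
    have e1 : (ch.toNat : Int) + 1 - 97 = ((ch.toNat : Int) - 97) + 1 := by ring
    have e2 : ((97 + p0 : Nat) : Int) + 1 - 97 = (p0 : Int) + 1 := by push_cast; ring
    rw [e1, e2, hcast]
    rw [PySem.Int.mod_eq_emod_of_pos (by omega), PySem.Int.mod_eq_emod_of_pos (by omega),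
        PySem.Int.mod_eq_emod_of_pos (by omega)]
    omega
  simp only [solLoopA, if_pos hi]
  rw [hch]

-- B-side: the filtered pyRange is the cast of alw
theorem allowedI_eq (skip : List String) :
    (PySem.List.pyRange 0 26 1).filter
      (fun p => !decide (String.ofList [Char.ofNat (97 + p).toNat] ∈ PySem.Set.ofList skip)) =
    (alw (PySem.Set.ofList skip)).map (fun q => ((q : Nat) : Int)) := by
  have hr : PySem.List.pyRange 0 26 1 = (List.range 26).map (fun k => ((k : Nat) : Int)) := by
    rw [PySem.List.pyRange_one]
    norm_num
    rfl
  rw [hr, List.filter_map, alw]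
  apply congrArg
  apply List.filter_congr
  intro q hq
  simp only [Function.comp, blk]
  have e : (97 + (q : Int)).toNat = 97 + q := by omega
  rw [e]

theorem per_char (skip : List String) (index : Int) (ch : Char)
    (hi : 0 < index) (hm : alw (PySem.Set.ofList skip) ≠ []) :
    solLoopA (PySem.Set.ofList skip) index (26 * index).toNat ch 0 =
      Char.ofNat (97 + (alw (PySem.Set.ofList skip)).getD
        ((cnt (PySem.Set.ofList skip) (PySem.Int.mod ((ch.toNat : Int) - 97) 26).toNat
          + index.toNat - 1) % (alw (PySem.Set.ofList skip)).length) 0) := by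
  set ss := PySem.Set.ofList skip
  set p0 := (PySem.Int.mod ((ch.toNat : Int) - 97) 26).toNat with hp0
  have hlt : p0 < 26 := p0_lt ch
  have hf1 : 1 ≤ (26 * index).toNat := by omega
  rw [swapStart ss index ch _ hi hf1, bridge ss index _ p0 0 hlt,
      core ss index hm _ p0 0 hlt (by omega) (by
        have : ((26 * index).toNat : Int) = 26 * index := by omega
        rw [this]
        have : (0:Int) ≤ (back ss p0 : Int) := by positivity
        omega)]
  norm_num

theorem foldl_map_shape (l : List Char) (f : Char → String) :
    l.foldl (fun acc ch => acc ++ [f ch]) [] = l.map f := by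
  simpa using PySem.List.foldl_append_singleton_eq_map f l []

theorem foldl_ite_append (c : Prop) [Decidable c] (l : List Char) (f g : Char → String) :
    l.foldl (fun acc ch => if c then acc ++ [f ch] else acc ++ [g ch]) [] =
      l.map (fun ch => if c then f ch else g ch) := by
  by_cases h : c
  · simp only [if_pos h, foldl_map_shape]
  · simp only [if_neg h, foldl_map_shape]

theorem solution_eq_per_char (s : String) (skip : List String) (index : Int)
    (hpre : Pre_solution s skip index) :
    solution s skip index = solution_alt s skip index := by
  simp only [solution, solution_alt, allowedI_eq skip]
  rw [foldl_map_shape, foldl_ite_append]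
  apply congrArg
  apply List.map_congr_left
  intro ch _
  by_cases hio : index ≤ 0
  · rw [if_pos (Or.inl hio), show (26 * index).toNat = 0 by omega]
    rfl
  · have hi : 0 < index := by omega
    set ss := PySem.Set.ofList skip with hss
    have hm : alw ss ≠ [] := by
      rcases hpre with h | ⟨p, hp, hnotin⟩
      · omega
      · intro hnil
        have hmem : p ∈ alw ss := by
          unfold alw
          rw [List.mem_filter]
          refine ⟨hp, ?_⟩
          have : String.ofList [Char.ofNat (97 + p)] ∉ ss := by
            rw [hss]
            intro hin
            exact hnotin ((PySem.Set.mem_ofList _ _).mp hin)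
          simp [blk, this]
        rw [hnil] at hmem
        exact absurd hmem (List.not_mem_nil)
    have hmlen : 0 < (alw ss).length := List.length_pos_iff.mpr hm
    have hcond : ¬ (index ≤ 0 ∨ ((alw ss).map (fun q => ((q : Nat) : Int))).length = 0) := by
      rw [not_or]
      constructor
      · omega
      · simp only [List.length_map]
        omega
    rw [if_neg hcond, per_char skip index ch hi hm]
    -- reduce B's Int-level expression to the Nat-level formula
    apply congrArg (fun c => String.ofList [c])
    set p0I := PySem.Int.mod ((ch.toNat : Int) - 97) 26 with hp0I
    have h0 : 0 ≤ p0I := PySem.Int.mod_nonneg _ (by omega)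
    set p0N := p0I.toNat with hp0N
    have hfil : ((alw ss).map (fun q => ((q : Nat) : Int))).filter (fun p => decide (p ≤ p0I)) =
        ((alw ss).filter (fun q => decide (q ≤ p0N))).map (fun q => ((q : Nat) : Int)) := by
      rw [List.filter_map]
      apply congrArg
      apply List.filter_congr
      intro q _
      simp only [Function.comp, decide_eq_decide]
      omega
    rw [hfil]
    have hidx : ((((alw ss).filter (fun q => decide (q ≤ p0N))).map (fun q => ((q : Nat) : Int))).length : Int)
        + index - 1 = ((cnt ss p0N + index.toNat - 1 : Nat) : Int) := by
      rw [List.length_map]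
      show ((cnt ss p0N : Nat) : Int) + index - 1 = _
      omega
    rw [hidx, List.length_map, PySem.Int.mod_natCast, PySem.List.pyGetD_natCast]
    set K := (cnt ss p0N + index.toNat - 1) % (alw ss).length with hK
    have hKlt : K < (alw ss).length := Nat.mod_lt _ hmlen
    rw [List.getD_eq_getElem (List.map (fun q => ((q : Nat) : Int)) (alw ss)) 0
          (by simpa using hKlt),
        List.getElem_map, List.getD_eq_getElem _ 0 hKlt]
    apply congrArg Char.ofNat
    omega

-- ===== VERDICT (by name: the statement is the Claim_ definition above) =====
theorem solution_spec : Claim_equal_solution := by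
  intro s skip index _ hpre
  unfold Spec_solution
  exact solution_eq_per_char s skip index hpre
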